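-- pv_equiv track=rewrite | github.com/HanKu16/neural-network | TrainingData.py | _set_desired_outputs
-- ===== SOURCE A (Python) =====
-- def _set_desired_outputs(number_of_outputs: int,
--                          indexes_of_desired_active_outputs: list[int]):
--     desired_outputs = []
--     for output_index in range(number_of_outputs):
--         if output_index in indexes_of_desired_active_outputs:
--             desired_outputs.append(1)
--         else:
--             desired_outputs.append(0)
--     return desired_outputs
-- ===== SOURCE B (Python) =====
-- def _set_desired_outputs(number_of_outputs: int,
--                          indexes_of_desired_active_outputs: list[int]):
--     desired_outputs = [0] * number_of_outputs
--     for idx in indexes_of_desired_active_outputs: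
--         if 0 <= idx < number_of_outputs:
--             desired_outputs[idx] = 1
--     return desired_outputs
-- ===== Notes on version B (the rewrite author's own statement) =====
-- stated objective: faster
-- what changed: B pre-allocates a zero vector and scatters 1s at the in-range active indexes, instead of scanning every output position and testing list membership.
import Mathlib
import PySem

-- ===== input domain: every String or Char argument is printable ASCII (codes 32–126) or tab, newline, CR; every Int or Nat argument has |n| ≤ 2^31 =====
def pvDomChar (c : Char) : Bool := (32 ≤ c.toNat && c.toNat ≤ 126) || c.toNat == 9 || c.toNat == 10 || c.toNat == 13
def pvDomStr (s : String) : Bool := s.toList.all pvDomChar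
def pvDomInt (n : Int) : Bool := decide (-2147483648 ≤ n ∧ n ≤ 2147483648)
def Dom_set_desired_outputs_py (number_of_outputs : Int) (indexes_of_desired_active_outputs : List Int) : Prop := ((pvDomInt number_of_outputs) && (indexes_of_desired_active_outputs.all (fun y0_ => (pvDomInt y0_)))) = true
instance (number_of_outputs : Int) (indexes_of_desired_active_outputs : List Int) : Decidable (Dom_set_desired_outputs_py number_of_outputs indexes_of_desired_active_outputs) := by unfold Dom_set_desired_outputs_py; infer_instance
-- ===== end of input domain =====

-- B pre-allocates a zero vector and scatters 1s at in-range active indexes (O(n+m))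
-- instead of testing membership for every output position (O(n*m)); return values agree everywhere.


-- ===== PORT A =====
def set_desired_outputs_py (number_of_outputs : Int) (indexes_of_desired_active_outputs : List Int) : List Int :=
  (PySem.List.pyRange 0 number_of_outputs 1).foldl
    (fun desired_outputs output_index =>
      if output_index ∈ indexes_of_desired_active_outputs then desired_outputs ++ [1]
      else desired_outputs ++ [0])
    []

-- ===== PORT B =====
def set_desired_outputs_py_alt (number_of_outputs : Int) (indexes_of_desired_active_outputs : List Int) : List Int :=
  indexes_of_desired_active_outputs.foldl
    (fun desired_outputs idx =>
      if 0 ≤ idx ∧ idx < number_of_outputs then desired_outputs.set idx.toNat 1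
      else desired_outputs)
    (List.replicate number_of_outputs.toNat 0)

-- ===== PRECONDITION & SPEC =====
def Spec_set_desired_outputs_py (number_of_outputs : Int) (indexes_of_desired_active_outputs : List Int) (out : List Int) : Prop := out = set_desired_outputs_py_alt number_of_outputs indexes_of_desired_active_outputs
instance (number_of_outputs : Int) (indexes_of_desired_active_outputs : List Int) (out : List Int) : Decidable (Spec_set_desired_outputs_py number_of_outputs indexes_of_desired_active_outputs out) := by unfold Spec_set_desired_outputs_py; infer_instance

-- ===== CLAIM (what is proved, stated in full; the proofs are below) =====
def Claim_equal_set_desired_outputs_py : Prop := ∀ (number_of_outputs : Int) (indexes_of_desired_active_outputs : List Int), Dom_set_desired_outputs_py number_of_outputs indexes_of_desired_active_outputs → Spec_set_desired_outputs_py number_of_outputs indexes_of_desired_active_outputs (set_desired_outputs_py number_of_outputs indexes_of_desired_active_outputs)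

-- ===== LEMMAS AND PROOFS =====

-- elementwise characterisation of the scatter loop
theorem scatter_getElem? (n : Int) (idxs : List Int) (j : Nat) : ∀ (acc : List Int),
    acc.length = n.toNat →
    (idxs.foldl (fun d idx => if 0 ≤ idx ∧ idx < n then d.set idx.toNat 1 else d) acc)[j]?
      = if (j : Int) ∈ idxs ∧ (j : Int) < n then some 1 else acc[j]? := by
  induction idxs with
  | nil => intro acc _; simp
  | cons i tl ih =>
      intro acc hlen
      simp only [List.foldl_cons]
      have hlen' : (if 0 ≤ i ∧ i < n then acc.set i.toNat 1 else acc).length = n.toNat := by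
        split_ifs <;> simp [hlen]
      rw [ih _ hlen']
      have hstep : (if 0 ≤ i ∧ i < n then acc.set i.toNat 1 else acc)[j]?
          = if i = (j : Int) ∧ (j : Int) < n then some 1 else acc[j]? := by
        split_ifs with hg hc hc
        · have h1 : i.toNat = j := by omega
          have h2 : j < acc.length := by omega
          rw [List.getElem?_set]
          simp [h1, h2]
        · have hne : i.toNat ≠ j := by omega
          rw [List.getElem?_set]
          simp [hne]
        · exact absurd ⟨by omega, by omega⟩ hg
        · rfl
      rw [hstep]
      by_cases hm : (j:Int) ∈ tl <;> by_cases hjn : (j:Int) < n <;>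
        by_cases hi : i = (j:Int) <;>
          simp [List.mem_cons, hm, hjn, hi, eq_comm]

-- elementwise characterisation of A's append loop
theorem build_getElem? (n : Int) (idxs : List Int) (j : Nat) :
    (set_desired_outputs_py n idxs)[j]?
      = if j < n.toNat then some (if (j : Int) ∈ idxs then (1:Int) else 0) else none := by
  unfold set_desired_outputs_py
  have h : ∀ acc : List Int,
      (PySem.List.pyRange 0 n 1).foldl
        (fun d i => if i ∈ idxs then d ++ [1] else d ++ [0]) acc
      = acc ++ (PySem.List.pyRange 0 n 1).map (fun i => if i ∈ idxs then (1:Int) else 0) := by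
    intro acc
    have := PySem.List.foldl_append_singleton_eq_map
      (f := fun i => if i ∈ idxs then (1:Int) else 0)
      (l := PySem.List.pyRange 0 n 1) (acc := acc)
    rw [← this]
    apply PySem.List.foldl_congr_mem
    intro a x _
    split_ifs <;> rfl
  rw [h, List.nil_append, PySem.List.pyRange_one]
  simp only [List.map_map, List.getElem?_map]
  by_cases hj : j < (n - 0).toNat
  · have hj' : j < n.toNat := by omega
    simp [hj', Function.comp]
  · have hj' : ¬ j < n.toNat := by omega
    simp [hj']

-- ===== VERDICT (by name: the statement is the Claim_ definition above) =====
theorem set_desired_outputs_py_spec : Claim_equal_set_desired_outputs_py := by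
  intro n idxs _
  unfold Spec_set_desired_outputs_py
  apply List.ext_getElem?
  intro j
  rw [build_getElem? n idxs j]
  unfold set_desired_outputs_py_alt
  rw [scatter_getElem? n idxs j _ (by simp)]
  by_cases hj : j < n.toNat
  · have hjn : (j : Int) < n := by omega
    by_cases hm : (j : Int) ∈ idxs <;> simp [hj, hjn, hm]
  · have hjn : ¬ ((j : Int) < n) := by omega
    simp [hj, hjn]
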